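-- pv_equiv track=rewrite | github.com/msampaio/music21 | music21/serial.py | _zeroCenteredTransformation
-- ===== SOURCE A (Python) =====
-- class SerialException(Exception):
--     pass
--
-- def _zeroCenteredTransformation(pitchList, transformationType, index):
--
--     numPitches = len(pitchList)
--     if int(index) != index:
--         raise SerialException("Transformation must be by an integer.")
--     else:
--         firstPitch = pitchList[0]
--         transformedPitchList = []
--         if transformationType == 'P':
--             for i in range(0,numPitches):
--                 newPitch = (pitchList[i] - firstPitch + index) % 12
--                 transformedPitchList.append(newPitch)
--             return transformedPitchList
--         elif transformationType == 'I':
--             for i in range(0,numPitches):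
--                 newPitch = (index + firstPitch - pitchList[i]) % 12
--                 transformedPitchList.append(newPitch)
--             return transformedPitchList
--         elif transformationType == 'R':
--             for i in range(0,numPitches):
--                 newPitch = (index + pitchList[numPitches-1-i] - firstPitch) % 12
--                 transformedPitchList.append(newPitch)
--             return transformedPitchList
--         elif transformationType == 'RI':
--             for i in range(0,numPitches):
--                 newPitch = (index - pitchList[numPitches-1-i] + firstPitch) % 12
--                 transformedPitchList.append(newPitch)
--             return transformedPitchList
--         else:
--             raise SerialException("Invalid transformation type.")
-- ===== SOURCE B (Python) =====
-- class SerialException(Exception):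
--     pass
--
-- def _zeroCenteredTransformation(pitchList, transformationType, index):
--     if int(index) != index:
--         raise SerialException("Transformation must be by an integer.")
--     firstPitch = pitchList[0]
--     # interval vector of the row: successive differences
--     intervals = [b - a for a, b in zip(pitchList, pitchList[1:])]
--     if transformationType == 'P':
--         start, steps = index, intervals
--     elif transformationType == 'I':
--         start, steps = index, [-d for d in intervals]
--     elif transformationType == 'R':
--         start, steps = index + pitchList[-1] - firstPitch, [-d for d in reversed(intervals)]
--     elif transformationType == 'RI':
--         start, steps = index - pitchList[-1] + firstPitch, list(reversed(intervals))
--     else: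
--         raise SerialException("Invalid transformation type.")
--     # reconstruct the row by a running prefix sum over the interval steps
--     result = [start % 12]
--     cur = start
--     for d in steps:
--         cur += d
--         result.append(cur % 12)
--     return result
-- ===== Notes on version B (the rewrite author's own statement) =====
-- stated objective: alternative
-- what changed: B computes the row's interval vector (successive differences) once and reconstructs each transformed row by a running prefix sum from a derived starting pitch (negating and/or reversing the interval vector per type), instead of A's four per-element closed-formula loops.
import Mathlib
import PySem

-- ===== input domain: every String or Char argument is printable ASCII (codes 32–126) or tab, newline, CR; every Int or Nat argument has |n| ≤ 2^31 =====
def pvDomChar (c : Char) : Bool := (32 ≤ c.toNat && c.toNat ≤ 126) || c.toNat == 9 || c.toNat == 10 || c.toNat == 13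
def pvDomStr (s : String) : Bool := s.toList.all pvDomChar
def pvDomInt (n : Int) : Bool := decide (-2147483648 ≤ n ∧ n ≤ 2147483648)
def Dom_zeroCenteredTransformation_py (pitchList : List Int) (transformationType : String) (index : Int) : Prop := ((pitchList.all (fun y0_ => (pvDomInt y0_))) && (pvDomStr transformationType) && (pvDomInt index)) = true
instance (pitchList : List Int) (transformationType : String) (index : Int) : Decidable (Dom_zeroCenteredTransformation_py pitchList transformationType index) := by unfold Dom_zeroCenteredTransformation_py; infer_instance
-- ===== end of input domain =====

-- B rebuilds each transformed row from the interval vector (successive differences) by a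
-- running prefix sum, instead of A's four per-element closed-formula loops (objective: alternative).

-- ===== PORT A =====
def zeroCenteredTransformation_py (pitchList : List Int) (transformationType : String) (index : Int) : List Int :=
  let numPitches : Int := pitchList.length
  let firstPitch : Int := (PySem.List.pyGet? pitchList 0).getD 0
  if transformationType == "P" then
    (PySem.List.pyRange 0 numPitches 1).foldl
      (fun acc i => acc ++ [PySem.Int.mod (PySem.List.pyGetD pitchList i 0 - firstPitch + index) 12]) []
  else if transformationType == "I" then
    (PySem.List.pyRange 0 numPitches 1).foldl
      (fun acc i => acc ++ [PySem.Int.mod (index + firstPitch - PySem.List.pyGetD pitchList i 0) 12]) []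
  else if transformationType == "R" then
    (PySem.List.pyRange 0 numPitches 1).foldl
      (fun acc i => acc ++ [PySem.Int.mod (index + PySem.List.pyGetD pitchList (numPitches - 1 - i) 0 - firstPitch) 12]) []
  else if transformationType == "RI" then
    (PySem.List.pyRange 0 numPitches 1).foldl
      (fun acc i => acc ++ [PySem.Int.mod (index - PySem.List.pyGetD pitchList (numPitches - 1 - i) 0 + firstPitch) 12]) []
  else []  -- Python raises SerialException here; excluded by Pre_

-- ===== PORT B =====
def zeroCenteredTransformation_py_alt (pitchList : List Int) (transformationType : String) (index : Int) : List Int :=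
  let firstPitch : Int := (PySem.List.pyGet? pitchList 0).getD 0
  -- intervals = [b - a for a, b in zip(pitchList, pitchList[1:])]; pitchList[1:] is the tail
  let intervals : List Int := (pitchList.zip pitchList.tail).map (fun ab => ab.2 - ab.1)
  let lastPitch : Int := (PySem.List.pyGet? pitchList (-1)).getD 0
  let startSteps : Int × List Int :=
    if transformationType == "P" then (index, intervals)
    else if transformationType == "I" then (index, intervals.map (fun d => -d))
    else if transformationType == "R" then (index + lastPitch - firstPitch, intervals.reverse.map (fun d => -d))
    else if transformationType == "RI" then (index - lastPitch + firstPitch, intervals.reverse)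
    else (0, [])  -- Python raises SerialException here; excluded by Pre_
  -- result = [start % 12]; for d in steps: cur += d; result.append(cur % 12)
  (startSteps.2.foldl
    (fun (st : Int × List Int) d => (st.1 + d, st.2 ++ [PySem.Int.mod (st.1 + d) 12]))
    (startSteps.1, [PySem.Int.mod startSteps.1 12])).2

-- ===== PRECONDITION & SPEC =====
-- Pre_ excludes exactly the inputs where A raises: the empty pitch list (IndexError on
-- pitchList[0]) and any transformation type other than P/I/R/RI (SerialException).
def Pre_zeroCenteredTransformation_py (pitchList : List Int) (transformationType : String) (index : Int) : Prop :=
  pitchList ≠ [] ∧ (transformationType = "P" ∨ transformationType = "I" ∨ transformationType = "R" ∨ transformationType = "RI")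
instance (pitchList : List Int) (transformationType : String) (index : Int) : Decidable (Pre_zeroCenteredTransformation_py pitchList transformationType index) := by unfold Pre_zeroCenteredTransformation_py; infer_instance
def pvWitness_zeroCenteredTransformation_py : List Int × String × Int := ([0, 3, 7, 11], "R", 5)
def Spec_zeroCenteredTransformation_py (pitchList : List Int) (transformationType : String) (index : Int) (out : List Int) : Prop := out = zeroCenteredTransformation_py_alt pitchList transformationType index
instance (pitchList : List Int) (transformationType : String) (index : Int) (out : List Int) : Decidable (Spec_zeroCenteredTransformation_py pitchList transformationType index out) := by unfold Spec_zeroCenteredTransformation_py; infer_instance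

-- ===== CLAIM (what is proved, stated in full; the proofs are below) =====
def Claim_equal_zeroCenteredTransformation_py : Prop := ∀ (pitchList : List Int) (transformationType : String) (index : Int), Dom_zeroCenteredTransformation_py pitchList transformationType index → Pre_zeroCenteredTransformation_py pitchList transformationType index → Spec_zeroCenteredTransformation_py pitchList transformationType index (zeroCenteredTransformation_py pitchList transformationType index)

-- ===== LEMMAS AND PROOFS =====

-- Mapping g over range n with reversed argument n-1-k is the reverse of mapping g forward.
theorem pv_map_range_rev {α : Type} (g : Int → α) (n : Nat) :
    (List.range n).map (fun k : Nat => g ((n : Int) - 1 - (k : Int))) =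
      ((List.range n).map (fun k : Nat => g (k : Int))).reverse := by
  induction n with
  | zero => simp
  | succ m ih =>
    conv_lhs => rw [List.range_succ_eq_map]
    conv_rhs => rw [List.range_succ]
    simp only [List.map_cons, List.map_map, List.map_append, List.map_nil,
      List.reverse_append, List.reverse_cons, List.reverse_nil, List.nil_append,
      List.singleton_append, List.cons.injEq]
    refine ⟨by push_cast; ring_nf, ?_⟩
    have h : ((fun k : Nat => g ((↑(m + 1) : Int) - 1 - (k : Int))) ∘ Nat.succ) =
        (fun k : Nat => g ((m : Int) - 1 - (k : Int))) := by
      funext k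
      simp only [Function.comp_apply]
      congr 1
      push_cast
      ring
    rw [h, ih]

-- A's forward-indexed append loop is map over the list.
theorem pv_fwd_loop (xs : List Int) (f : Int → Int) :
    (PySem.List.pyRange 0 (xs.length : Int) 1).foldl
      (fun acc i => acc ++ [f (PySem.List.pyGetD xs i 0)]) [] = xs.map f := by
  rw [PySem.List.foldl_pyRange_zero_pyGetD' xs 0 (fun acc v => acc ++ [f v]) []]
  rw [PySem.List.foldl_append_singleton_eq_map]
  simp

-- A's reverse-indexed append loop is the reverse of map over the list.
theorem pv_rev_loop (xs : List Int) (f : Int → Int) :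
    (PySem.List.pyRange 0 (xs.length : Int) 1).foldl
      (fun acc i => acc ++ [f (PySem.List.pyGetD xs ((xs.length : Int) - 1 - i) 0)]) [] =
      (xs.map f).reverse := by
  rw [PySem.List.foldl_append_singleton_eq_map]
  rw [PySem.List.pyRange_one]
  simp only [List.map_map, Int.sub_zero, Int.toNat_natCast, List.nil_append]
  have h1 : ((fun i : Int => f (PySem.List.pyGetD xs ((xs.length : Int) - 1 - i) 0)) ∘
        (fun k : Nat => (0 : Int) + (k : Int))) =
      (fun k : Nat => (fun j : Int => f (PySem.List.pyGetD xs j 0)) ((xs.length : Int) - 1 - (k : Int))) := by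
    funext k
    simp
  rw [h1, pv_map_range_rev (fun j : Int => f (PySem.List.pyGetD xs j 0)) xs.length]
  congr 1
  have h2 : (List.range xs.length).map (fun k : Nat => f (PySem.List.pyGetD xs (k : Int) 0)) =
      ((List.range xs.length).map (fun k : Nat => PySem.List.pyGetD xs (k : Int) 0)).map f := by
    simp [List.map_map, Function.comp]
  rw [h2]
  congr 1
  apply List.ext_getElem
  · simp
  · intro i h1 h2
    simp only [List.getElem_map, List.getElem_range, PySem.List.pyGetD_natCast]
    simp_all [List.getD_eq_getElem?_getD]

-- Partial (prefix) sums of a step list starting after cur.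
def pvPsums (cur : Int) : List Int → List Int
  | [] => []
  | d :: t => (cur + d) :: pvPsums (cur + d) t

-- Interval vector: successive differences.
def pvDiffs (xs : List Int) : List Int := (xs.zip xs.tail).map (fun ab => ab.2 - ab.1)

theorem pvDiffs_cons_cons (a b : Int) (t : List Int) :
    pvDiffs (a :: b :: t) = (b - a) :: pvDiffs (b :: t) := by
  simp [pvDiffs]

-- B's loop: the result list accumulates mod-12 of the prefix sums.
theorem pv_b_loop (steps : List Int) : ∀ (cur : Int) (acc : List Int),
    (steps.foldl (fun (st : Int × List Int) d => (st.1 + d, st.2 ++ [PySem.Int.mod (st.1 + d) 12]))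
      (cur, acc)).2 = acc ++ (pvPsums cur steps).map (fun v => PySem.Int.mod v 12) := by
  induction steps with
  | nil => intro cur acc; simp [pvPsums]
  | cons d t ih =>
    intro cur acc
    simp only [List.foldl_cons, pvPsums, List.map_cons]
    rw [ih]
    simp

-- Prefix sums over the interval vector reconstruct the list.
theorem pv_recon : ∀ (rest : List Int) (a : Int),
    a :: pvPsums a (pvDiffs (a :: rest)) = a :: rest := by
  intro rest
  induction rest with
  | nil => intro a; simp [pvDiffs, pvPsums]
  | cons b t ih =>
    intro a
    rw [pvDiffs_cons_cons, pvPsums]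
    have hb : a + (b - a) = b := by ring
    rw [hb]
    exact congrArg (List.cons a) (ih b)

theorem pv_recon' (ys : List Int) (a : Int) (h : ys.head? = some a) :
    a :: pvPsums a (pvDiffs ys) = ys := by
  cases ys with
  | nil => simp at h
  | cons x t =>
    simp only [List.head?_cons, Option.some.injEq] at h
    subst h
    exact pv_recon t x

-- Adding a constant to each element leaves the interval vector unchanged.
theorem pvDiffs_map_add (c : Int) : ∀ (xs : List Int),
    pvDiffs (xs.map (fun p => p + c)) = pvDiffs xs := by
  intro xs
  induction xs with
  | nil => simp [pvDiffs]
  | cons a t ih =>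
    cases t with
    | nil => simp [pvDiffs]
    | cons b u =>
      simp only [List.map_cons] at ih ⊢
      rw [pvDiffs_cons_cons, pvDiffs_cons_cons, ih]
      congr 1
      ring

-- Subtracting each element from a constant negates the interval vector.
theorem pvDiffs_map_sub (c : Int) : ∀ (xs : List Int),
    pvDiffs (xs.map (fun p => c - p)) = (pvDiffs xs).map (fun d => -d) := by
  intro xs
  induction xs with
  | nil => simp [pvDiffs]
  | cons a t ih =>
    cases t with
    | nil => simp [pvDiffs]
    | cons b u =>
      simp only [List.map_cons] at ih ⊢
      rw [pvDiffs_cons_cons, pvDiffs_cons_cons, ih, List.map_cons]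
      congr 1
      ring

-- Appending an element extends the interval vector by its difference from the last element.
theorem pvDiffs_snoc : ∀ (ys : List Int) (q p : Int), ys.getLast? = some q →
    pvDiffs (ys ++ [p]) = pvDiffs ys ++ [p - q] := by
  intro ys
  induction ys with
  | nil => intro q p h; simp at h
  | cons y v ih =>
    intro q p h
    cases v with
    | nil =>
      simp only [List.getLast?_singleton, Option.some.injEq] at h
      subst h
      simp [pvDiffs]
    | cons z w =>
      have h' : (z :: w).getLast? = some q := by
        rw [List.getLast?_cons_cons] at h; exact h
      have hz := ih q p h'
      simp only [List.cons_append] at hz ⊢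
      rw [pvDiffs_cons_cons, hz, pvDiffs_cons_cons]
      simp

-- Reversing the list reverses and negates the interval vector.
theorem pvDiffs_reverse : ∀ (xs : List Int),
    pvDiffs xs.reverse = ((pvDiffs xs).map (fun d => -d)).reverse := by
  intro xs
  induction xs with
  | nil => simp [pvDiffs]
  | cons a t ih =>
    cases t with
    | nil => simp [pvDiffs]
    | cons b u =>
      have hrev : (a :: b :: u).reverse = (b :: u).reverse ++ [a] := by simp
      have hlast : (b :: u).reverse.getLast? = some b := by
        rw [List.getLast?_reverse]; simp
      rw [hrev, pvDiffs_snoc _ b a hlast, ih, pvDiffs_cons_cons]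
      simp only [List.map_cons, List.reverse_cons]
      congr 1
      ring

-- ===== VERDICT (by name: the statement is the Claim_ definition above) =====
theorem zeroCenteredTransformation_py_spec : Claim_equal_zeroCenteredTransformation_py := by
  intro pitchList transformationType index _ hpre
  unfold Spec_zeroCenteredTransformation_py
  obtain ⟨hne, ht⟩ := hpre
  cases pitchList with
  | nil => exact absurd rfl hne
  | cons x t =>
  unfold zeroCenteredTransformation_py zeroCenteredTransformation_py_alt
  have hfirst : ((PySem.List.pyGet? (x :: t) 0).getD 0) = x := by simp
  have hlastopt : (PySem.List.pyGet? (x :: t) (-1)) = (x :: t).getLast? := PySem.List.pyGet?_neg_one _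
  have hgl : (x :: t).getLast? = some ((x :: t).getLast (by simp)) :=
    List.getLast?_eq_some_getLast (by simp)
  have hdiffs : ((x :: t).zip (x :: t).tail).map (fun ab => ab.2 - ab.1) = pvDiffs (x :: t) := rfl
  rcases ht with rfl | rfl | rfl | rfl
  all_goals simp only [String.reduceBEq, beq_self_eq_true, if_true, Bool.false_eq_true, if_false,
    hfirst, hlastopt, hgl, Option.getD_some, hdiffs, pv_b_loop]
  · -- P
    rw [pv_fwd_loop (x :: t) (fun p => PySem.Int.mod (p - x + index) 12)]
    have hvs : index :: pvPsums index (pvDiffs (x :: t)) = (x :: t).map (fun p => p - x + index) := by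
      have h1 : pvDiffs ((x :: t).map (fun p => p - x + index)) = pvDiffs (x :: t) := by
        rw [show (x :: t).map (fun p => p - x + index) = (x :: t).map (fun p => p + (index - x)) from
          List.map_congr_left (fun p _ => by ring), pvDiffs_map_add]
      rw [← h1]
      apply pv_recon'
      simp only [List.map_cons, List.head?_cons, Option.some.injEq]
      ring
    rw [show List.map (fun p => PySem.Int.mod (p - x + index) 12) (x :: t) =
        ((x :: t).map (fun p => p - x + index)).map (fun v => PySem.Int.mod v 12) from by
      simp [List.map_map, Function.comp_def]]
    rw [← hvs]
    simp
  · -- I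
    rw [pv_fwd_loop (x :: t) (fun p => PySem.Int.mod (index + x - p) 12)]
    have hvs : index :: pvPsums index ((pvDiffs (x :: t)).map (fun d => -d)) =
        (x :: t).map (fun p => index + x - p) := by
      have h1 : pvDiffs ((x :: t).map (fun p => index + x - p)) = (pvDiffs (x :: t)).map (fun d => -d) := by
        rw [show (x :: t).map (fun p => index + x - p) = (x :: t).map (fun p => (index + x) - p) from
          List.map_congr_left (fun p _ => by ring), pvDiffs_map_sub]
      rw [← h1]
      apply pv_recon'
      simp only [List.map_cons, List.head?_cons, Option.some.injEq]
      ring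
    rw [show List.map (fun p => PySem.Int.mod (index + x - p) 12) (x :: t) =
        ((x :: t).map (fun p => index + x - p)).map (fun v => PySem.Int.mod v 12) from by
      simp [List.map_map, Function.comp_def]]
    rw [← hvs]
    simp
  · -- R
    rw [pv_rev_loop (x :: t) (fun p => PySem.Int.mod (index + p - x) 12)]
    have hsteps : (pvDiffs (x :: t)).reverse.map (fun d => -d) =
        pvDiffs (((x :: t).map (fun p => index + p - x)).reverse) := by
      rw [pvDiffs_reverse, show (x :: t).map (fun p => index + p - x) =
          (x :: t).map (fun p => p + (index - x)) from
        List.map_congr_left (fun p _ => by ring), pvDiffs_map_add, List.map_reverse]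
    have hvs : (index + (x :: t).getLast (by simp) - x) ::
        pvPsums (index + (x :: t).getLast (by simp) - x) ((pvDiffs (x :: t)).reverse.map (fun d => -d)) =
        ((x :: t).map (fun p => index + p - x)).reverse := by
      rw [hsteps]
      apply pv_recon'
      rw [List.head?_reverse, List.getLast?_map, hgl]
      simp
    rw [show (List.map (fun p => PySem.Int.mod (index + p - x) 12) (x :: t)).reverse =
        (((x :: t).map (fun p => index + p - x)).reverse).map (fun v => PySem.Int.mod v 12) from by
      simp [List.map_reverse, List.map_map]]
    rw [← hvs]
    simp
  · -- RI
    rw [pv_rev_loop (x :: t) (fun p => PySem.Int.mod (index - p + x) 12)]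
    have hsteps : (pvDiffs (x :: t)).reverse =
        pvDiffs (((x :: t).map (fun p => index - p + x)).reverse) := by
      rw [pvDiffs_reverse, show (x :: t).map (fun p => index - p + x) =
          (x :: t).map (fun p => (index + x) - p) from
        List.map_congr_left (fun p _ => by ring), pvDiffs_map_sub]
      simp [List.map_map, Function.comp_def]
    have hvs : (index - (x :: t).getLast (by simp) + x) ::
        pvPsums (index - (x :: t).getLast (by simp) + x) ((pvDiffs (x :: t)).reverse) =
        ((x :: t).map (fun p => index - p + x)).reverse := by
      rw [hsteps]
      apply pv_recon'
      rw [List.head?_reverse, List.getLast?_map, hgl]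
      simp only [Option.map_some]
    rw [show (List.map (fun p => PySem.Int.mod (index - p + x) 12) (x :: t)).reverse =
        (((x :: t).map (fun p => index - p + x)).reverse).map (fun v => PySem.Int.mod v 12) from by
      simp [List.map_reverse, List.map_map]]
    rw [← hvs]
    simp
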